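-- pv_equiv track=rewrite | github.com/sebacaccaro/tesi_magistrale | Valutazione/valutazione.py | errorScore
-- ===== SOURCE A (Python) =====
-- def errorBitMask(c, cp, cpp):
--     return [0 if c[i] == cp[i] == cpp[i] else 1 for i in range(len(c))]
--
-- def bitMaskToPos(bitmask):
--     ranges = []
--     current = []
--     for i in range(len(bitmask)):
--         value = bitmask[i]
--         if value == 0:
--             if len(current) > 0:
--                 ranges.append(current)
--                 current = []
--         elif value == 1:
--             current.append(i)
--     if len(current) > 0:
--         ranges.append(current)
--     return ranges
--
-- def errorChars(sentence, ranges):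
--     return ["".join([sentence[i] for i in r]) for r in ranges]
--
-- def errorScore(c, cp, cpp):
--     errors = bitMaskToPos(errorBitMask(c, cp, cp))
--     c = errorChars(c, errors)
--     cp = errorChars(cp, errors)
--     perturbation_errors = sum([1 for i in range(len(c)) if c[i] != cp[i]])
--     corrected_errors = 0
--     introduced_errors = perturbation_errors
--     return {
--         "perturbation_errors": perturbation_errors,
--         "corrected_errors": corrected_errors,
--         "introduced_errors": introduced_errors,
--     }
-- ===== SOURCE B (Python) =====
-- def errorScore(c, cp, cpp):
--     # Single pass: walk the positions once, accumulating the current run of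
--     # mismatching positions as two concatenated strings; close a run when a
--     # matching position (or the end) is reached and count it if the two
--     # concatenations differ.  cpp is ignored, as in the original.
--     count = 0
--     in_run = False
--     sc = ""
--     sp = ""
--     for i in range(len(c)):
--         if c[i] != cp[i]:
--             sc += c[i]
--             sp += cp[i]
--             in_run = True
--         else:
--             if in_run and sc != sp:
--                 count += 1
--             sc = ""
--             sp = ""
--             in_run = False
--     if in_run and sc != sp:
--         count += 1
--     return {
--         "perturbation_errors": count,
--         "corrected_errors": 0,
--         "introduced_errors": count,
--     }
-- ===== Notes on version B (the rewrite author's own statement) =====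
-- stated objective: simpler
-- what changed: A builds a 0/1 bitmask list, extracts run index-lists from it, materializes two lists of joined substrings and recounts differing pairs by index; B makes one pass over the positions, accumulating the current mismatch run's two concatenations and counting a run when it closes with differing concatenations.
import Mathlib
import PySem

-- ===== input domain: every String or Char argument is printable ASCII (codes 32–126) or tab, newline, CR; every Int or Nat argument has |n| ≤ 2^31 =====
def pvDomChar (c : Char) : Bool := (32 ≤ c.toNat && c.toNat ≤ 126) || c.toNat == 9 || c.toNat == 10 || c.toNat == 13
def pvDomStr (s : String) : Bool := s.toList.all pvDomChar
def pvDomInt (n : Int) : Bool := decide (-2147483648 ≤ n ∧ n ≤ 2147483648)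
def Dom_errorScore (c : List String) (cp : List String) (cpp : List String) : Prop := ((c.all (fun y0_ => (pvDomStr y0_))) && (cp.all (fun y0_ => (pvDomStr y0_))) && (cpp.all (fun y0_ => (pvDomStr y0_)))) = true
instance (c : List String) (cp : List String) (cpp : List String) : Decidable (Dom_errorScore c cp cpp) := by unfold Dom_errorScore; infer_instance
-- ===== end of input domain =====

-- B replaces A's four-phase pipeline (bitmask list, run extraction, two joined
-- string lists, an index-based recount) by a single pass over the positions that
-- closes and compares each mismatch run on the fly (objective: simpler).

-- ===== PORT A =====
def errorBitMask (c : List String) (cp : List String) (cpp : List String) : List Int :=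
  (PySem.List.pyRange 0 (c.length : Int) 1).map (fun i =>
    if PySem.List.pyGetD c i "" = PySem.List.pyGetD cp i "" ∧
       PySem.List.pyGetD cp i "" = PySem.List.pyGetD cpp i "" then 0 else 1)

def bitMaskToPos (bitmask : List Int) : List (List Int) :=
  let st := (PySem.List.pyRange 0 (bitmask.length : Int) 1).foldl
    (fun (st : List (List Int) × List Int) i =>
      let value := PySem.List.pyGetD bitmask i 0
      if value = 0 then
        (if st.2.length > 0 then (st.1 ++ [st.2], []) else st)
      else if value = 1 then (st.1, st.2 ++ [i])
      else st)
    ([], [])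
  if st.2.length > 0 then st.1 ++ [st.2] else st.1

def errorChars (sentence : List String) (ranges : List (List Int)) : List String :=
  ranges.map (fun r => PySem.Str.join "" (r.map (fun i => PySem.List.pyGetD sentence i "")))

def errorScore (c : List String) (cp : List String) (cpp : List String) : List (String × Int) :=
  let errors := bitMaskToPos (errorBitMask c cp cp)
  let c2 := errorChars c errors
  let cp2 := errorChars cp errors
  let perturbation_errors : Int :=
    (((PySem.List.pyRange 0 (c2.length : Int) 1).filter
        (fun i => decide (PySem.List.pyGetD c2 i "" ≠ PySem.List.pyGetD cp2 i ""))).map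
      (fun _ => (1 : Int))).sum
  let corrected_errors : Int := 0
  let introduced_errors : Int := perturbation_errors
  [("perturbation_errors", perturbation_errors),
   ("corrected_errors", corrected_errors),
   ("introduced_errors", introduced_errors)]

-- ===== PORT B =====
def errorScore_alt (c : List String) (cp : List String) (cpp : List String) : List (String × Int) :=
  let st := (PySem.List.pyRange 0 (c.length : Int) 1).foldl
    (fun (st : Int × Bool × String × String) i =>
      if PySem.List.pyGetD c i "" ≠ PySem.List.pyGetD cp i "" then
        (st.1, true, st.2.2.1 ++ PySem.List.pyGetD c i "", st.2.2.2 ++ PySem.List.pyGetD cp i "")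
      else
        (if st.2.1 ∧ st.2.2.1 ≠ st.2.2.2 then st.1 + 1 else st.1, false, "", ""))
    (0, false, "", "")
  let count : Int := if st.2.1 ∧ st.2.2.1 ≠ st.2.2.2 then st.1 + 1 else st.1
  [("perturbation_errors", count),
   ("corrected_errors", (0 : Int)),
   ("introduced_errors", count)]

-- ===== PRECONDITION & SPEC =====
-- Pre_ excludes only the inputs where A raises IndexError: cp shorter than c
-- (both programs index cp[i] for every i < len(c)).
def Pre_errorScore (c : List String) (cp : List String) (cpp : List String) : Prop :=
  c.length ≤ cp.length
instance (c : List String) (cp : List String) (cpp : List String) : Decidable (Pre_errorScore c cp cpp) := by unfold Pre_errorScore; infer_instance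

def pvWitness_errorScore : List String × List String × List String :=
  (["ab", "c", "d"], ["a", "bc", "d"], [])

def Spec_errorScore (c : List String) (cp : List String) (cpp : List String) (out : List (String × Int)) : Prop := out = errorScore_alt c cp cpp
instance (c : List String) (cp : List String) (cpp : List String) (out : List (String × Int)) : Decidable (Spec_errorScore c cp cpp out) := by unfold Spec_errorScore; infer_instance

-- ===== CLAIM (what is proved, stated in full; the proofs are below) =====
def Claim_equal_errorScore : Prop := ∀ (c : List String) (cp : List String) (cpp : List String), Dom_errorScore c cp cpp → Pre_errorScore c cp cpp → Spec_errorScore c cp cpp (errorScore c cp cpp)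

-- ===== LEMMAS AND PROOFS =====

-- join with an empty separator is concatenation (Mathlib has no List.intercalate_nil)
theorem pvIntercalate_nil (l : List (List Char)) : List.intercalate [] l = l.flatten := by
  induction l with
  | nil => simp [List.intercalate]
  | cons x xs ih => cases xs <;> simp_all [List.intercalate, List.intersperse]

-- the joined string of a run's positions in s
def pvJ (s : List String) (r : List Int) : String :=
  PySem.Str.join "" (r.map (fun i => PySem.List.pyGetD s i ""))

theorem pvJ_nil (s : List String) : pvJ s [] = "" := by
  apply String.toList_inj.mp
  simp [pvJ, PySem.Str.toList_join]

theorem pvJ_snoc (s : List String) (r : List Int) (i : Int) :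
    pvJ s (r ++ [i]) = pvJ s r ++ PySem.List.pyGetD s i "" := by
  apply String.toList_inj.mp
  simp [pvJ, PySem.Str.toList_join, PySem.Chars.join, pvIntercalate_nil, String.toList_append]

theorem pvErrorChars_eq (s : List String) (rs : List (List Int)) :
    errorChars s rs = rs.map (pvJ s) := rfl

theorem pvBM_len (c cp cpp : List String) : (errorBitMask c cp cpp).length = c.length := by
  simp [errorBitMask, PySem.List.length_pyRange_one]

theorem pvBM_get (c cp : List String) (i : Int) (h0 : 0 ≤ i) (h : i < (c.length : Int)) :
    PySem.List.pyGetD (errorBitMask c cp cp) i 0 =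
      if PySem.List.pyGetD c i "" = PySem.List.pyGetD cp i "" then 0 else 1 := by
  unfold errorBitMask
  rw [PySem.List.pyGetD_map_pyRange_of_nonneg _ _ _ _ h0 h]
  simp

-- core loop invariant: B's single-pass state is determined by A's run-extraction state
def pvPhi (c cp : List String) (A : List (List Int) × List Int) : Int × Bool × String × String :=
  (((A.1.filter (fun r => decide (pvJ c r ≠ pvJ cp r))).length : Int),
   decide (A.2 ≠ []), pvJ c A.2, pvJ cp A.2)

theorem pvLoop (c cp : List String) (k : Nat) (hk : k ≤ c.length) :
    (PySem.List.pyRange 0 (k : Int) 1).foldl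
      (fun (st : Int × Bool × String × String) i =>
        if PySem.List.pyGetD c i "" ≠ PySem.List.pyGetD cp i "" then
          (st.1, true, st.2.2.1 ++ PySem.List.pyGetD c i "", st.2.2.2 ++ PySem.List.pyGetD cp i "")
        else
          (if st.2.1 ∧ st.2.2.1 ≠ st.2.2.2 then st.1 + 1 else st.1, false, "", ""))
      (0, false, "", "")
    = pvPhi c cp ((PySem.List.pyRange 0 (k : Int) 1).foldl
        (fun (st : List (List Int) × List Int) i =>
          let value := PySem.List.pyGetD (errorBitMask c cp cp) i 0
          if value = 0 then
            (if st.2.length > 0 then (st.1 ++ [st.2], []) else st)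
          else if value = 1 then (st.1, st.2 ++ [i])
          else st)
        ([], [])) := by
  induction k with
  | zero => simp [PySem.List.pyRange_one_eq_nil, pvPhi, pvJ_nil]
  | succ k ih =>
      have hk' : k ≤ c.length := Nat.le_of_succ_le hk
      have hcast : ((k + 1 : Nat) : Int) = (k : Int) + 1 := by push_cast; ring
      rw [hcast, PySem.List.pyRange_one_succ_right (by positivity)]
      rw [List.foldl_append, List.foldl_append, ih hk']
      generalize (PySem.List.pyRange 0 (k : Int) 1).foldl
        (fun (st : List (List Int) × List Int) i =>
          let value := PySem.List.pyGetD (errorBitMask c cp cp) i 0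
          if value = 0 then
            (if st.2.length > 0 then (st.1 ++ [st.2], []) else st)
          else if value = 1 then (st.1, st.2 ++ [i])
          else st)
        ([], []) = A
      obtain ⟨rs, cur⟩ := A
      simp only [List.foldl_cons, List.foldl_nil]
      rw [pvBM_get c cp (k : Int) (by positivity) (by exact_mod_cast hk)]
      by_cases h : PySem.List.pyGetD c (k : Int) "" = PySem.List.pyGetD cp (k : Int) ""
      · -- matching position: value = 0, the current run (if any) is closed
        simp only [h, ne_eq, not_true_eq_false, if_false]
        by_cases hc : cur = []
        · simp [hc, pvPhi, pvJ_nil]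
        · have hlen : 0 < cur.length := List.length_pos_of_ne_nil hc
          by_cases hd : pvJ c cur = pvJ cp cur
          · simp [pvPhi, hc, hlen, hd, pvJ_nil]
          · simp [pvPhi, hc, hlen, hd, pvJ_nil]
      · -- mismatching position: value = 1, the current run grows
        simp only [ne_eq, h, not_false_eq_true, if_true]
        simp [pvPhi, pvJ_snoc]

-- the final recount over the two joined lists equals counting differing runs directly
theorem pvCountLen (l : List (List Int)) (F G : List Int → String) :
    ((PySem.List.pyRange 0 ((l.map F).length : Int) 1).filter
        (fun i => decide (PySem.List.pyGetD (l.map F) i "" ≠ PySem.List.pyGetD (l.map G) i ""))).length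
    = (l.filter (fun r => decide (F r ≠ G r))).length := by
  induction l using List.reverseRecOn with
  | nil => simp [PySem.List.pyRange_one_eq_nil]
  | append_singleton l x ih =>
      have hlen : (((l ++ [x]).map F).length : Int) = ((l.map F).length : Int) + 1 := by
        simp
      rw [hlen, PySem.List.pyRange_one_succ_right (by positivity)]
      have hcong : (PySem.List.pyRange 0 ((l.map F).length : Int) 1).filter
          (fun i => decide (PySem.List.pyGetD ((l ++ [x]).map F) i "" ≠ PySem.List.pyGetD ((l ++ [x]).map G) i ""))
          = (PySem.List.pyRange 0 ((l.map F).length : Int) 1).filter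
          (fun i => decide (PySem.List.pyGetD (l.map F) i "" ≠ PySem.List.pyGetD (l.map G) i "")) := by
        apply List.filter_congr
        intro i hi
        rw [PySem.List.mem_pyRange_one] at hi
        obtain ⟨h0, hlt⟩ := hi
        have hiF : PySem.List.pyGetD ((l ++ [x]).map F) i "" = PySem.List.pyGetD (l.map F) i "" := by
          rw [PySem.List.pyGetD_of_nonneg _ _ h0, PySem.List.pyGetD_of_nonneg _ _ h0]
          rw [List.map_append]
          rw [List.getD_append]
          simp at hlt ⊢
          omega
        have hiG : PySem.List.pyGetD ((l ++ [x]).map G) i "" = PySem.List.pyGetD (l.map G) i "" := by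
          rw [PySem.List.pyGetD_of_nonneg _ _ h0, PySem.List.pyGetD_of_nonneg _ _ h0]
          rw [List.map_append]
          rw [List.getD_append]
          simp at hlt ⊢
          omega
        rw [hiF, hiG]
      have hlastF : PySem.List.pyGetD ((l ++ [x]).map F) ((l.map F).length : Int) "" = F x := by
        rw [PySem.List.pyGetD_of_nonneg _ _ (by positivity)]
        simp [List.getD]
      have hlastG : PySem.List.pyGetD ((l ++ [x]).map G) ((l.map F).length : Int) "" = G x := by
        rw [PySem.List.pyGetD_of_nonneg _ _ (by positivity)]
        simp [List.getD]
      rw [List.filter_append, List.length_append, hcong, ih]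
      rw [List.filter_append (l₁ := l), List.length_append]
      have hsecond : ((List.filter
          (fun i => decide (PySem.List.pyGetD ((l ++ [x]).map F) i "" ≠ PySem.List.pyGetD ((l ++ [x]).map G) i ""))
          [((l.map F).length : Int)])).length
          = (List.filter (fun r => decide (F r ≠ G r)) [x]).length := by
        simp only [List.filter, hlastF, hlastG]
        by_cases hx : F x = G x
        · simp [hx]
        · simp [hx]
      omega

-- the same fact in the normal form simp leaves behind
theorem pvCountLen' (l : List (List Int)) (F G : List Int → String) :
    (List.filter
        (fun i => !decide (PySem.List.pyGetD (l.map F) i "" = PySem.List.pyGetD (l.map G) i ""))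
        (PySem.List.pyRange 0 (l.length : Int) 1)).length
    = (List.filter (fun r => !decide (F r = G r)) l).length := by
  have h := pvCountLen l F G
  simpa using h

-- ===== VERDICT (by name: the statement is the Claim_ definition above) =====
theorem errorScore_spec : Claim_equal_errorScore := by
  intro c cp cpp _ hpre
  unfold Spec_errorScore
  unfold errorScore errorScore_alt
  rw [pvLoop c cp c.length le_rfl]
  unfold bitMaskToPos
  rw [pvBM_len]
  simp only [pvErrorChars_eq]
  generalize (PySem.List.pyRange 0 (c.length : Int) 1).foldl
    (fun (st : List (List Int) × List Int) i =>
      let value := PySem.List.pyGetD (errorBitMask c cp cp) i 0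
      if value = 0 then
        (if st.2.length > 0 then (st.1 ++ [st.2], []) else st)
      else if value = 1 then (st.1, st.2 ++ [i])
      else st)
    ([], []) = A
  obtain ⟨rs, cur⟩ := A
  by_cases hc : cur = []
  · simp [hc, pvPhi, pvCountLen']
  · have hlen : 0 < cur.length := List.length_pos_of_ne_nil hc
    have hsnoc := pvCountLen' (rs ++ [cur]) (pvJ c) (pvJ cp)
    simp only [List.map_append, List.map_cons, List.map_nil, List.length_append,
      List.length_cons, List.length_nil, List.filter_append, List.filter_cons,
      List.filter_nil] at hsnoc
    push_cast at hsnoc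
    simp [pvPhi, hc, hlen]
    rw [hsnoc]
    by_cases hd : pvJ c cur = pvJ cp cur
    · simp [hd]
    · simp [hd]
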